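-- pv_equiv track=rewrite | github.com/YeHoonJang/archive_for_everything | project_univ/pknu/sanhak_seminar/0511/code/glossary_extraction/glossary_utils.py | reconstruct_word_alignments
-- ===== SOURCE A (Python) =====
-- def reconstruct_word_alignments(alignments):
--     src_dicts = {}
--     tgt_dicts = {}
--     for src_idx, tgt_idx in alignments:
--         src_idx, tgt_idx = str(src_idx), str(tgt_idx)
--         if src_dicts.get(src_idx, None) == None:
--             src_dicts[src_idx] = tgt_idx
--         else:
--             src_dicts[src_idx] += f'-{tgt_idx}'
--
--         if tgt_dicts.get(tgt_idx, None) == None: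
--             tgt_dicts[tgt_idx] = src_idx
--         else:
--             tgt_dicts[tgt_idx] += f'-{src_idx}'
--     return src_dicts, tgt_dicts
-- ===== SOURCE B (Python) =====
-- def reconstruct_word_alignments(alignments):
--     src_groups = {}
--     tgt_groups = {}
--     for src_idx, tgt_idx in alignments:
--         s, t = str(src_idx), str(tgt_idx)
--         src_groups.setdefault(s, []).append(t)
--         tgt_groups.setdefault(t, []).append(s)
--     return ({k: '-'.join(v) for k, v in src_groups.items()},
--             {k: '-'.join(v) for k, v in tgt_groups.items()})
-- ===== Notes on version B (the rewrite author's own statement) =====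
-- stated objective: idiomatic
-- what changed: Replaces incremental per-entry string concatenation with a present/absent branch by branch-free group-then-join: one pass collecting index lists per key, then one '-'.join pass building the result dicts.
import Mathlib
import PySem

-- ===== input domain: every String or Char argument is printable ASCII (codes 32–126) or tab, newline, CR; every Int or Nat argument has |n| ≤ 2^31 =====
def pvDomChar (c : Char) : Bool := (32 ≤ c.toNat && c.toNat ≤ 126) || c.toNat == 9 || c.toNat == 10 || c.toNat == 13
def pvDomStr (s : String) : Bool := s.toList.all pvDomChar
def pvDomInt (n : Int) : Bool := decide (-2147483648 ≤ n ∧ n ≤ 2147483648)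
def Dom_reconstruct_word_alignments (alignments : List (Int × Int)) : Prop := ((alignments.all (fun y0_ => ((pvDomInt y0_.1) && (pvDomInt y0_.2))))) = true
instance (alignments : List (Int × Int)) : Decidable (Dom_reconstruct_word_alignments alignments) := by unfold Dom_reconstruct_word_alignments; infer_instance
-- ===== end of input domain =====

-- B replaces A's incremental string concatenation (with a present/absent branch) by
-- branch-free group-then-join: collect each key's indices in a list, then '-'.join them (objective: idiomatic).

-- ===== PORT A =====
-- one if/else body of A's loop for one of the two dicts: absent → set, present → old += f'-{v}'
-- (the concatenation old + '-' + v is written PySem.Str.join "-" [old, v], which is exactly it)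
def pvStepA (d : PySem.Dict String String) (k v : String) : PySem.Dict String String :=
  match d.get? k with
  | none => d.insert k v
  | some old => d.insert k (PySem.Str.join "-" [old, v])

def reconstruct_word_alignments (alignments : List (Int × Int)) : (List (String × String)) × (List (String × String)) :=
  let st := alignments.foldl
    (fun (st : PySem.Dict String String × PySem.Dict String String) p =>
      let src := PySem.Int.toStr p.1
      let tgt := PySem.Int.toStr p.2
      (pvStepA st.1 src tgt, pvStepA st.2 tgt src))
    (PySem.Dict.empty, PySem.Dict.empty)
  (st.1.items, st.2.items)

-- ===== PORT B =====
def reconstruct_word_alignments_alt (alignments : List (Int × Int)) : (List (String × String)) × (List (String × String)) :=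
  let gs := alignments.foldl
    (fun (gs : PySem.Dict String (List String) × PySem.Dict String (List String)) p =>
      let s := PySem.Int.toStr p.1
      let t := PySem.Int.toStr p.2
      -- setdefault(k, []).append(x)  =  d[k] = d.get(k, []) + [x]
      (gs.1.modify s [] (· ++ [t]), gs.2.modify t [] (· ++ [s])))
    (PySem.Dict.empty, PySem.Dict.empty)
  (gs.1.items.map (fun p => (p.1, PySem.Str.join "-" p.2)),
   gs.2.items.map (fun p => (p.1, PySem.Str.join "-" p.2)))

-- ===== PRECONDITION & SPEC =====
def Spec_reconstruct_word_alignments (alignments : List (Int × Int)) (out : (List (String × String)) × (List (String × String))) : Prop := out = reconstruct_word_alignments_alt alignments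
instance (alignments : List (Int × Int)) (out : (List (String × String)) × (List (String × String))) : Decidable (Spec_reconstruct_word_alignments alignments out) := by unfold Spec_reconstruct_word_alignments; infer_instance

-- ===== CLAIM (what is proved, stated in full; the proofs are below) =====
def Claim_equal_reconstruct_word_alignments : Prop := ∀ (alignments : List (Int × Int)), Dom_reconstruct_word_alignments alignments → Spec_reconstruct_word_alignments alignments (reconstruct_word_alignments alignments)

-- ===== LEMMAS AND PROOFS =====

-- '-'.join(vs ++ [t]) appends '-' ++ t when vs ≠ []
theorem pvChars_join_append (sep : List Char) (vs : List (List Char)) (t : List Char)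
    (h : vs ≠ []) :
    PySem.Chars.join sep (vs ++ [t]) = PySem.Chars.join sep vs ++ sep ++ t := by
  induction vs with
  | nil => cases h rfl
  | cons a rest ih =>
    cases rest with
    | nil => simp [PySem.Chars.join_cons_cons, PySem.Chars.join_singleton]
    | cons b r =>
      simp only [List.cons_append] at ih ⊢
      rw [PySem.Chars.join_cons_cons, PySem.Chars.join_cons_cons, ih (by simp)]
      simp [List.append_assoc]

theorem pvStr_join_append (vs : List String) (t : String) (h : vs ≠ []) :
    PySem.Str.join "-" (vs ++ [t]) = PySem.Str.join "-" [PySem.Str.join "-" vs, t] := by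
  rw [← String.toList_inj]
  rw [PySem.Str.toList_join, PySem.Str.toList_join, List.map_append]
  simp only [List.map_cons, List.map_nil]
  rw [pvChars_join_append _ _ _ (by simpa using h)]
  rw [PySem.Chars.join_cons_cons, PySem.Chars.join_singleton, PySem.Str.toList_join]

-- A's string dict is the pointwise '-'.join of B's group dict
def pvJF : String × List String → String × String :=
  fun p => (p.1, PySem.Str.join "-" p.2)

theorem pvStep (g : PySem.Dict String (List String)) (s : PySem.Dict String String)
    (hnd : g.keys.Nodup)
    (hrel : s.items = g.items.map pvJF)
    (hne : ∀ p ∈ g.items, p.2 ≠ []) (k v : String) :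
    pvStepA s k v = PySem.Dict.mk ((g.modify k [] (· ++ [v])).items.map pvJF) := by
  have hkeys : s.keys = g.keys := by
    show s.items.map Prod.fst = g.items.map Prod.fst
    rw [hrel, List.map_map]; rfl
  have hsnd : s.keys.Nodup := hkeys ▸ hnd
  rw [PySem.Dict.modify]
  by_cases hc : g.contains k = true
  · -- key present: both sides overwrite in place
    have hcs : s.contains k = true := by
      rw [PySem.Dict.contains_eq_decide_mem_keys, hkeys,
        ← PySem.Dict.contains_eq_decide_mem_keys]; exact hc
    obtain ⟨vs, hvs⟩ : ∃ vs, g.get? k = some vs := by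
      have := PySem.Dict.contains_eq_isSome_get? g k
      rw [hc] at this
      exact Option.isSome_iff_exists.mp this.symm
    have hitem : (k, vs) ∈ g.items := PySem.Dict.mem_items_of_get?_eq_some g hvs
    have hvsne : vs ≠ [] := hne _ hitem
    have hs : s.get? k = some (PySem.Str.join "-" vs) := by
      have : (k, PySem.Str.join "-" vs) ∈ s.items := by
        rw [hrel]; exact List.mem_map.mpr ⟨(k, vs), hitem, rfl⟩
      exact PySem.Dict.get?_of_mem_items s this hsnd
    have hgd : g.getD k [] = vs := PySem.Dict.getD_of_get?_eq_some g [] hvs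
    rw [pvStepA, hs]
    apply PySem.Dict.ext
    rw [PySem.Dict.items_insert_of_contains s _ hcs, hgd,
      PySem.Dict.items_insert_of_contains g _ hc]
    show _ = (g.items.map fun p => if p.1 == k then (k, vs ++ [v]) else p).map pvJF
    rw [hrel, List.map_map, List.map_map]
    apply List.map_congr_left
    intro p _
    by_cases hpk : p.1 == k
    · simp only [Function.comp, pvJF, hpk, if_pos]
      rw [pvStr_join_append vs v hvsne]
    · simp only [Function.comp, pvJF, hpk]
      simp
  · -- key absent: both sides append a fresh entry
    have hcs : s.contains k = false := by
      rw [PySem.Dict.contains_eq_decide_mem_keys, hkeys,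
        ← PySem.Dict.contains_eq_decide_mem_keys]; simpa using hc
    have hs : s.get? k = none := by
      rw [PySem.Dict.get?_eq_none_iff_contains]; exact hcs
    have hgd : g.getD k [] = [] :=
      PySem.Dict.getD_of_not_contains g [] (by simpa using hc)
    rw [pvStepA, hs]
    apply PySem.Dict.ext
    rw [PySem.Dict.items_insert_of_not_contains s _ hcs, hgd,
      PySem.Dict.items_insert_of_not_contains g _ (by simpa using hc)]
    rw [List.map_append, hrel]
    simp [pvJF, PySem.Str.join]

-- nonemptiness of the group lists is preserved by the B-side step
theorem pvNe_step (g : PySem.Dict String (List String)) (k v : String)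
    (hne : ∀ p ∈ g.items, p.2 ≠ []) :
    ∀ p ∈ (g.modify k [] (· ++ [v])).items, p.2 ≠ [] := by
  intro p hp
  rw [PySem.Dict.modify] at hp
  rcases (PySem.Dict.mem_items_insert _ _ _ _).mp hp with h | ⟨h, _⟩
  · subst h; simp
  · exact hne _ h

-- the two parallel folds, by induction on the list, carrying the invariant for both sides
theorem pvMain :
    ∀ (l : List (Int × Int)) (s t : PySem.Dict String String)
      (g1 g2 : PySem.Dict String (List String)),
      g1.keys.Nodup → g2.keys.Nodup →
      s.items = g1.items.map pvJF → t.items = g2.items.map pvJF →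
      (∀ p ∈ g1.items, p.2 ≠ []) → (∀ p ∈ g2.items, p.2 ≠ []) →
      (l.foldl (fun st p =>
          (pvStepA st.1 (PySem.Int.toStr p.1) (PySem.Int.toStr p.2),
           pvStepA st.2 (PySem.Int.toStr p.2) (PySem.Int.toStr p.1))) (s, t)).1.items
        = (l.foldl (fun gs p =>
          (gs.1.modify (PySem.Int.toStr p.1) [] (· ++ [PySem.Int.toStr p.2]),
           gs.2.modify (PySem.Int.toStr p.2) [] (· ++ [PySem.Int.toStr p.1]))) (g1, g2)).1.items.map pvJF
      ∧ (l.foldl (fun st p =>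
          (pvStepA st.1 (PySem.Int.toStr p.1) (PySem.Int.toStr p.2),
           pvStepA st.2 (PySem.Int.toStr p.2) (PySem.Int.toStr p.1))) (s, t)).2.items
        = (l.foldl (fun gs p =>
          (gs.1.modify (PySem.Int.toStr p.1) [] (· ++ [PySem.Int.toStr p.2]),
           gs.2.modify (PySem.Int.toStr p.2) [] (· ++ [PySem.Int.toStr p.1]))) (g1, g2)).2.items.map pvJF := by
  intro l
  induction l with
  | nil => intro s t g1 g2 _ _ hr1 hr2 _ _; exact ⟨hr1, hr2⟩
  | cons x xs ih =>
    intro s t g1 g2 hnd1 hnd2 hr1 hr2 hne1 hne2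
    simp only [List.foldl_cons]
    rw [pvStep g1 s hnd1 hr1 hne1 (PySem.Int.toStr x.1) (PySem.Int.toStr x.2),
      pvStep g2 t hnd2 hr2 hne2 (PySem.Int.toStr x.2) (PySem.Int.toStr x.1)]
    exact ih _ _ _ _
      (by rw [PySem.Dict.modify]; exact PySem.Dict.nodup_keys_insert _ _ _ hnd1)
      (by rw [PySem.Dict.modify]; exact PySem.Dict.nodup_keys_insert _ _ _ hnd2)
      rfl rfl (pvNe_step g1 _ _ hne1) (pvNe_step g2 _ _ hne2)

-- ===== VERDICT (by name: the statement is the Claim_ definition above) =====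
theorem reconstruct_word_alignments_spec : Claim_equal_reconstruct_word_alignments := by
  intro al _
  show reconstruct_word_alignments al = reconstruct_word_alignments_alt al
  simp only [reconstruct_word_alignments, reconstruct_word_alignments_alt]
  have h := pvMain al PySem.Dict.empty PySem.Dict.empty PySem.Dict.empty PySem.Dict.empty
    PySem.Dict.nodup_keys_empty PySem.Dict.nodup_keys_empty rfl rfl (by simp [PySem.Dict.empty]) (by simp [PySem.Dict.empty])
  rw [h.1, h.2]
  rfl
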